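-- pv_equiv track=rewrite | github.com/biruk1230/dsa-interview-prep | solutions/encode_and_decode_strings.py | decode_escaped
-- ===== SOURCE A (Python) =====
-- def decode_escaped(s: str) -> list[str]:
--     """Scan for unescaped '|' terminators; '\\' consumes the next character literally."""
--     result = []
--     current = []
--     i = 0
--     while i < len(s):
--         if s[i] == '\\':
--             current.append(s[i + 1])  # next char is literal regardless of what it is
--             i += 2
--         elif s[i] == '|':
--             result.append(''.join(current))
--             current = []
--             i += 1
--         else:
--             current.append(s[i])
--             i += 1
--     return result
-- ===== SOURCE B (Python) =====
-- def unescape(seg: str) -> str: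
--     out = []
--     j = 0
--     while j < len(seg):
--         if seg[j] == '\\':
--             out.append(seg[j + 1])
--             j += 2
--         else:
--             out.append(seg[j])
--             j += 1
--     return ''.join(out)
--
--
-- def decode_escaped(s: str) -> list[str]:
--     # Phase 1: split into raw (still-escaped) segments at unescaped '|' terminators;
--     # an unterminated trailing segment is dropped.
--     segs = []
--     raw = []
--     i = 0
--     n = len(s)
--     while i < n:
--         c = s[i]
--         if c == '\\':
--             raw.append(s[i:i + 2])  # keep the escape pair intact (slice never raises)
--             i += 2
--         elif c == '|':
--             segs.append(''.join(raw))
--             raw = []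
--             i += 1
--         else:
--             raw.append(c)
--             i += 1
--     # Phase 2: unescape each terminated segment.
--     return [unescape(seg) for seg in segs]
-- ===== Notes on version B (the rewrite author's own statement) =====
-- stated objective: alternative
-- what changed: B works in two phases: it first splits the input into raw still-escaped segments at the unescaped delimiters (dropping the unterminated tail), then unescapes each segment in a second pass, instead of A's single fused scan that builds decoded characters directly.
-- crash fix: A raises IndexError on strings whose trailing run of backslashes has odd length (a lone '\' is the last character the scan reaches); B returns the list of terminated segments there, dropping the malformed unterminated tail. — e.g. on decode_escaped("a|b\\"): A raises IndexError, B returns ["a"]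
import Mathlib
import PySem

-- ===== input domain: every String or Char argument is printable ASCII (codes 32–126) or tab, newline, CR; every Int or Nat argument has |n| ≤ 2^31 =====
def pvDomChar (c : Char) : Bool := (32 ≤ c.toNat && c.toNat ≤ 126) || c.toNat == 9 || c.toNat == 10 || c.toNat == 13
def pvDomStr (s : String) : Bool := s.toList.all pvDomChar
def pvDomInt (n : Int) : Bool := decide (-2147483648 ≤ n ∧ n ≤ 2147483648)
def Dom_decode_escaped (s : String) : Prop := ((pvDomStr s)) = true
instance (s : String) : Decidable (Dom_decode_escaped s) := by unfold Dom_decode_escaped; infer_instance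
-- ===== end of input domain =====

-- B splits the input into raw escaped segments at unescaped '|' and unescapes them in a
-- second pass, instead of A's fused one-pass scan; same asymptotic cost, different decomposition.


-- ===== PORT A =====
-- A's while loop over index i, transcribed as recursion on the suffix of characters
-- from position i; 'cur' and 'res' are the loop's current/result lists.
-- On the branch where Python reads s[i+1] past the end (IndexError) the port returns
-- the partial result; Pre_decode_escaped excludes exactly those inputs.
def decodeGoA : List Char → List Char → List String → List String
  | [], _cur, res => res
  | '\\' :: rest, cur, res =>
    match rest with
    | [] => res                                  -- Python: IndexError (outside Pre_)
    | c :: rest' => decodeGoA rest' (cur ++ [c]) res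
  | '|' :: rest, cur, res => decodeGoA rest [] (res ++ [String.ofList cur])
  | c :: rest, cur, res => decodeGoA rest (cur ++ [c]) res

def decode_escaped (s : String) : List String := decodeGoA s.toList [] []

-- ===== PORT B =====
-- Phase 1: split into raw (still-escaped) segments at unescaped '|'; the escape pair
-- s[i:i+2] is kept intact ('\\' plus the next char when present); an unterminated
-- trailing segment (including a lone trailing '\\') is dropped.
def splitRaw : List Char → List Char → List (List Char)
  | [], _raw => []
  | '\\' :: rest, raw =>
    match rest with
    | [] => []                                   -- raw gets the lone '\\'; tail dropped
    | c :: rest' => splitRaw rest' (raw ++ ['\\', c])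
  | '|' :: rest, raw => raw :: splitRaw rest []
  | c :: rest, raw => splitRaw rest (raw ++ [c])

-- Phase 2: unescape one segment ('\\' consumes the next char literally).
def unescapeB : List Char → List Char
  | [] => []
  | '\\' :: rest =>
    match rest with
    | [] => []                                   -- Python would raise; unreachable on splitRaw output
    | c :: rest' => c :: unescapeB rest'
  | c :: rest => c :: unescapeB rest

def decode_escaped_alt (s : String) : List String :=
  (splitRaw s.toList []).map (fun seg => String.ofList (unescapeB seg))

-- ===== PRECONDITION & SPEC =====
-- Pre_ excludes exactly the inputs on which Python's A raises IndexError: strings whose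
-- trailing run of backslashes has odd length (the scan then reads one char past the end).
def Pre_decode_escaped (s : String) : Prop :=
  (s.toList.reverse.takeWhile (· == '\\')).length % 2 = 0
instance (s : String) : Decidable (Pre_decode_escaped s) := by unfold Pre_decode_escaped; infer_instance

def pvWitness_decode_escaped : String := "ab\\|c|d"

-- A raises IndexError on strings whose trailing backslash run is odd; B returns the
-- terminated segments there, dropping the malformed unterminated tail.
def Raises_decode_escaped (s : String) : Prop :=
  (s.toList.reverse.takeWhile (· == '\\')).length % 2 = 1
instance (s : String) : Decidable (Raises_decode_escaped s) := by unfold Raises_decode_escaped; infer_instance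
def pvRaiseWitness_decode_escaped : String := "a|b\\"
def pvRaiseWitnessOut_decode_escaped : List String := ["a"]

def Spec_decode_escaped (s : String) (out : List String) : Prop := out = decode_escaped_alt s
instance (s : String) (out : List String) : Decidable (Spec_decode_escaped s out) := by unfold Spec_decode_escaped; infer_instance

-- ===== CLAIM (what is proved, stated in full; the proofs are below) =====
def Claim_equal_decode_escaped : Prop := ∀ (s : String), Dom_decode_escaped s → Pre_decode_escaped s → Spec_decode_escaped s (decode_escaped s)
def Claim_raises_decode_escaped : Prop := (∀ (s : String), Dom_decode_escaped s → Raises_decode_escaped s → ¬ Pre_decode_escaped s) ∧ (Dom_decode_escaped (pvRaiseWitness_decode_escaped) ∧ Raises_decode_escaped (pvRaiseWitness_decode_escaped) ∧ decode_escaped_alt (pvRaiseWitness_decode_escaped) = pvRaiseWitnessOut_decode_escaped)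

-- ===== LEMMAS AND PROOFS =====

-- 'raw is well-formed escaped text': every backslash opens a complete pair.
inductive WFE : List Char → Prop
  | nil : WFE []
  | pair (c : Char) {r : List Char} : WFE r → WFE ('\\' :: c :: r)
  | one {c : Char} {r : List Char} : c ≠ '\\' → WFE r → WFE (c :: r)

-- reduction lemmas for the compiled matches
lemma unescapeB_pair (c : Char) (r : List Char) :
    unescapeB ('\\' :: c :: r) = c :: unescapeB r := rfl

lemma unescapeB_one {c : Char} (hc : c ≠ '\\') (r : List Char) :
    unescapeB (c :: r) = c :: unescapeB r := by
  cases r <;> simp [unescapeB]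

lemma decodeGoA_pair (c : Char) (rest : List Char) (cur : List Char) (res : List String) :
    decodeGoA ('\\' :: c :: rest) cur res = decodeGoA rest (cur ++ [c]) res := rfl

lemma decodeGoA_bar (rest : List Char) (cur : List Char) (res : List String) :
    decodeGoA ('|' :: rest) cur res = decodeGoA rest [] (res ++ [String.ofList cur]) := rfl

lemma decodeGoA_one {c : Char} (hc1 : c ≠ '\\') (hc2 : c ≠ '|') (rest : List Char)
    (cur : List Char) (res : List String) :
    decodeGoA (c :: rest) cur res = decodeGoA rest (cur ++ [c]) res := by
  rw [decodeGoA.eq_def]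
  split <;> simp_all

lemma splitRaw_pair (c : Char) (rest : List Char) (raw : List Char) :
    splitRaw ('\\' :: c :: rest) raw = splitRaw rest (raw ++ ['\\', c]) := rfl

lemma splitRaw_bar (rest : List Char) (raw : List Char) :
    splitRaw ('|' :: rest) raw = raw :: splitRaw rest [] := rfl

lemma splitRaw_one {c : Char} (hc1 : c ≠ '\\') (hc2 : c ≠ '|') (rest : List Char)
    (raw : List Char) :
    splitRaw (c :: rest) raw = splitRaw rest (raw ++ [c]) := by
  rw [splitRaw.eq_def]
  split <;> simp_all

lemma WFE_append {a b : List Char} (ha : WFE a) (hb : WFE b) : WFE (a ++ b) := by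
  induction ha with
  | nil => simpa using hb
  | pair c _ ih => exact WFE.pair c ih
  | one hc _ ih => exact WFE.one hc ih

lemma unescapeB_append {a : List Char} (b : List Char) (ha : WFE a) :
    unescapeB (a ++ b) = unescapeB a ++ unescapeB b := by
  induction ha with
  | nil => rfl
  | pair c _ ih => simp [unescapeB_pair, ih]
  | one hc _ ih => simp [unescapeB_one hc, ih]

-- trailing-backslash-run bookkeeping
lemma tail_cons_ne {c : Char} (hc : c ≠ '\\') (rest : List Char) :
    ((c :: rest).reverse.takeWhile (· == '\\')).length =
      (rest.reverse.takeWhile (· == '\\')).length := by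
  rw [show (c :: rest).reverse = rest.reverse ++ [c] by simp]
  rw [List.takeWhile_append]
  split
  · next h =>
      simp only [List.length_append, h, List.length_reverse]
      simp [hc]
  · rfl

lemma evenTail_cons {c : Char} (hc : c ≠ '\\') (rest : List Char)
    (h : ((c :: rest).reverse.takeWhile (· == '\\')).length % 2 = 0) :
    (rest.reverse.takeWhile (· == '\\')).length % 2 = 0 := by
  rwa [tail_cons_ne hc rest] at h

lemma evenTail_cons2 (c : Char) (rest : List Char)
    (h : (('\\' :: c :: rest).reverse.takeWhile (· == '\\')).length % 2 = 0) :
    (rest.reverse.takeWhile (· == '\\')).length % 2 = 0 := by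
  rw [show ('\\' :: c :: rest).reverse = rest.reverse ++ [c, '\\'] by simp] at h
  rw [List.takeWhile_append] at h
  have h2 : List.takeWhile (· == '\\') [c, '\\'] = if c = '\\' then [c, '\\'] else [] := by
    by_cases hcc : c = '\\' <;> simp [hcc]
  split at h
  · next hall =>
      have hl : (List.takeWhile (· == '\\') rest.reverse).length = rest.length := by
        simpa using hall
      rw [h2] at h
      by_cases hcc : c = '\\'
      · simp only [hcc, List.length_append, List.length_reverse] at h
        simp at h
        omega
      · simp only [if_neg hcc, List.length_append, List.length_reverse] at h
        simp at h
        omega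
  · exact h

lemma evenTail_not_single :
    ¬ ((['\\'] : List Char).reverse.takeWhile (· == '\\')).length % 2 = 0 := by decide

-- main invariant: the fused scan equals phase-1 split followed by phase-2 unescape
lemma main_inv (n : Nat) : ∀ (cs raw : List Char) (res : List String),
    cs.length ≤ n →
    (cs.reverse.takeWhile (· == '\\')).length % 2 = 0 →
    WFE raw →
    decodeGoA cs (unescapeB raw) res =
      res ++ (splitRaw cs raw).map (fun seg => String.ofList (unescapeB seg)) := by
  induction n with
  | zero =>
      intro cs raw res hlen _ _
      have hcs : cs = [] := by cases cs with | nil => rfl | cons a t => simp at hlen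
      subst hcs
      simp [decodeGoA, splitRaw]
  | succ n ih =>
      intro cs raw res hlen he hw
      cases cs with
      | nil => simp [decodeGoA, splitRaw]
      | cons c rest =>
        by_cases hbs : c = '\\'
        · subst hbs
          cases rest with
          | nil => exact absurd he evenTail_not_single
          | cons d rest' =>
              rw [decodeGoA_pair, splitRaw_pair]
              have h1 : unescapeB raw ++ [d] = unescapeB (raw ++ ['\\', d]) := by
                rw [unescapeB_append _ hw]; rfl
              rw [h1]
              exact ih rest' (raw ++ ['\\', d]) res (by simp at hlen ⊢; omega)
                (evenTail_cons2 d rest' he)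
                (WFE_append hw (WFE.pair d WFE.nil))
        · by_cases hbar : c = '|'
          · subst hbar
            rw [decodeGoA_bar, splitRaw_bar]
            have := ih rest [] (res ++ [String.ofList (unescapeB raw)])
              (by simp at hlen ⊢; omega) (evenTail_cons (by decide) rest he) WFE.nil
            · simpa using this
          · rw [decodeGoA_one hbs hbar, splitRaw_one hbs hbar]
            have h1 : unescapeB raw ++ [c] = unescapeB (raw ++ [c]) := by
              rw [unescapeB_append _ hw, unescapeB_one hbs]; rfl
            rw [h1]
            exact ih rest (raw ++ [c]) res (by simp at hlen ⊢; omega)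
              (evenTail_cons hbs rest he) (WFE_append hw (WFE.one hbs WFE.nil))

-- ===== VERDICT (by name: the statement is the Claim_ definition above) =====
theorem decode_escaped_spec : Claim_equal_decode_escaped := by
  intro s _hd hpre
  unfold Spec_decode_escaped decode_escaped decode_escaped_alt
  have := main_inv s.toList.length s.toList [] [] le_rfl hpre WFE.nil
  simpa [unescapeB] using this

@[simp] theorem decode_escaped_raises : Claim_raises_decode_escaped := by
  unfold Claim_raises_decode_escaped
  constructor
  · intro s _ hr hp
    unfold Raises_decode_escaped at hr
    unfold Pre_decode_escaped at hp
    omega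
  · exact ⟨by decide, by decide, by decide⟩
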